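-- pv_equiv track=rewrite | github.com/2tony2/helaicopter | python/oats/planner.py | _build_integration_branch
-- ===== SOURCE A (Python) =====
-- def _build_integration_branch(prefix: str, run_title: str) -> str:
--     normalized_prefix = prefix if prefix.endswith("/") else f"{prefix}/"
--     slug = "".join(
--         char.lower() if char.isalnum() else "-"
--         for char in run_title.strip()
--     )
--     compact_slug = "-".join(segment for segment in slug.split("-") if segment)
--     compact_slug = compact_slug or "run"
--     return f"{normalized_prefix}{compact_slug}"
-- ===== SOURCE B (Python) =====
-- def _build_integration_branch(prefix: str, run_title: str) -> str:
--     normalized_prefix = prefix if prefix.endswith("/") else prefix + "/"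
--     title = run_title.strip()
--     segments = []
--     i, n = 0, len(title)
--     while i < n:
--         if title[i].isalnum():
--             j = i
--             while j < n and title[j].isalnum():
--                 j += 1
--             segments.append(title[i:j].lower())
--             i = j
--         else:
--             i += 1
--     return normalized_prefix + ("-".join(segments) or "run")
-- ===== Notes on version B (the rewrite author's own statement) =====
-- stated objective: alternative
-- what changed: Replaces A's map-every-char-to-dash-then-split-then-refilter-then-rejoin pipeline with a single two-index scan that extracts maximal alphanumeric runs of the stripped title directly as lowercased segments.
import Mathlib
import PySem

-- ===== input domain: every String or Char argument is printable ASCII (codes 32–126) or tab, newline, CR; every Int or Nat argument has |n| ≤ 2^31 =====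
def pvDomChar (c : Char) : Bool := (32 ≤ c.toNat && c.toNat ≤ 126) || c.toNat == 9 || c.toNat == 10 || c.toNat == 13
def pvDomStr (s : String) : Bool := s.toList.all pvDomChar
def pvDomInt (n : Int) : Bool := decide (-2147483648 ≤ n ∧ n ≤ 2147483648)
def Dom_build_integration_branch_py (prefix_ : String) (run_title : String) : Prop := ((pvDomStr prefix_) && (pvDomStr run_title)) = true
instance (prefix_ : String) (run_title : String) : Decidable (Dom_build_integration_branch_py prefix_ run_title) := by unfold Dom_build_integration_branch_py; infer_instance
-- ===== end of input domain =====

-- B replaces A's map-to-dash / split / refilter / rejoin pipeline with a direct two-index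
-- scan extracting the maximal alphanumeric runs as lowercased segments (alternative, same cost).

-- ===== PORT A =====
-- string work is done on .toList (the sanctioned PySem bridge); slug.split("-") has the
-- literal non-empty separator "-", so PySem.Chars.splitOn is exact.
def build_integration_branch_py (prefix_ : String) (run_title : String) : String :=
  let normalized_prefix : List Char :=
    if PySem.Str.endswith prefix_ "/" then prefix_.toList else prefix_.toList ++ ['/']
  let slug : List Char :=
    (PySem.Str.strip run_title).toList.map
      (fun char => if PySem.Chars.isalnum char then PySem.Chars.lowerChar char else '-')
  let compact_slug : List Char :=
    PySem.Chars.join ['-'] ((PySem.Chars.splitOn slug ['-']).filter (fun segment => segment ≠ []))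
  let compact_slug : List Char := if compact_slug = [] then "run".toList else compact_slug
  String.ofList (normalized_prefix ++ compact_slug)

-- ===== PORT B =====
-- Source B's two-index while loop: the inner `while j < n and title[j].isalnum()` advance is the
-- takeWhile/dropWhile split of the remainder, the outer loop is the structural recursion.
def pvSegments : List Char → List (List Char)
  | [] => []
  | c :: rest =>
    if PySem.Chars.isalnum c then
      PySem.Chars.lower (c :: rest.takeWhile PySem.Chars.isalnum)
        :: pvSegments (rest.dropWhile PySem.Chars.isalnum)
    else
      pvSegments rest
termination_by l => l.length
decreasing_by
  · exact Nat.lt_succ_of_le (List.length_dropWhile_le _ _)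
  · exact Nat.lt_succ_of_le (Nat.le_refl _)

def build_integration_branch_py_alt (prefix_ : String) (run_title : String) : String :=
  let normalized_prefix : List Char :=
    if PySem.Str.endswith prefix_ "/" then prefix_.toList else prefix_.toList ++ ['/']
  let segments := pvSegments (PySem.Str.strip run_title).toList
  let compact : List Char := PySem.Chars.join ['-'] segments
  let compact : List Char := if compact = [] then "run".toList else compact
  String.ofList (normalized_prefix ++ compact)

-- ===== PRECONDITION & SPEC =====
def Spec_build_integration_branch_py (prefix_ : String) (run_title : String) (out : String) : Prop := out = build_integration_branch_py_alt prefix_ run_title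
instance (prefix_ : String) (run_title : String) (out : String) : Decidable (Spec_build_integration_branch_py prefix_ run_title out) := by unfold Spec_build_integration_branch_py; infer_instance

-- ===== CLAIM (what is proved, stated in full; the proofs are below) =====
def Claim_equal_build_integration_branch_py : Prop := ∀ (prefix_ : String) (run_title : String), Dom_build_integration_branch_py prefix_ run_title → Spec_build_integration_branch_py prefix_ run_title (build_integration_branch_py prefix_ run_title)

-- ===== LEMMAS AND PROOFS =====

-- A's per-char mapping
def pvF (c : Char) : Char := if PySem.Chars.isalnum c then PySem.Chars.lowerChar c else '-'

-- fuel-free reformulation of splitOn on the single-char separator '-'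
def pvSplitD : List Char → List (List Char)
  | [] => [[]]
  | c :: rest =>
    if c = '-' then [] :: pvSplitD rest
    else
      match pvSplitD rest with
      | s :: ss => (c :: s) :: ss
      | [] => [[c]]

lemma pvSplitD_ne_nil (l : List Char) : pvSplitD l ≠ [] := by
  cases l with
  | nil => simp [pvSplitD]
  | cons c rest =>
    simp only [pvSplitD]
    split_ifs
    · simp
    · cases pvSplitD rest <;> simp

lemma pvGo_eq (l : List Char) : ∀ (fuel : Nat) (cur : List Char) (acc : List (List Char)),
    l.length ≤ fuel →
    PySem.Chars.splitOn.go ['-'] fuel l cur acc =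
      acc.reverse ++ (match pvSplitD l with
        | s :: ss => (cur.reverse ++ s) :: ss
        | [] => [cur.reverse]) := by
  induction l with
  | nil =>
    intro fuel cur acc _
    cases fuel <;> simp [PySem.Chars.splitOn.go, pvSplitD]
  | cons c rest ih =>
    intro fuel cur acc hle
    cases fuel with
    | zero => simp at hle
    | succ n =>
      by_cases hc : c = '-'
      · subst hc
        rw [show PySem.Chars.splitOn.go ['-'] (n+1) ('-' :: rest) cur acc
              = PySem.Chars.splitOn.go ['-'] n rest [] (cur.reverse :: acc) by
            simp [PySem.Chars.splitOn.go, List.isPrefixOf]]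
        rw [ih n [] (cur.reverse :: acc) (by simpa using Nat.lt_succ_iff.mp (by simpa using hle))]
        simp only [pvSplitD]
        cases h : pvSplitD rest with
        | nil => exact absurd h (pvSplitD_ne_nil rest)
        | cons s ss => simp
      · rw [show PySem.Chars.splitOn.go ['-'] (n+1) (c :: rest) cur acc
              = PySem.Chars.splitOn.go ['-'] n rest (c :: cur) acc by
            simp [PySem.Chars.splitOn.go, List.isPrefixOf, Ne.symm hc]]
        rw [ih n (c :: cur) acc (by simpa using Nat.lt_succ_iff.mp (by simpa using hle))]
        simp only [pvSplitD, if_neg hc]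
        cases h : pvSplitD rest with
        | nil => exact absurd h (pvSplitD_ne_nil rest)
        | cons s ss => simp

lemma pvSplitOn_eq (l : List Char) : PySem.Chars.splitOn l ['-'] = pvSplitD l := by
  rw [PySem.Chars.splitOn, pvGo_eq l (l.length + 1) [] [] (Nat.le_succ _)]
  cases h : pvSplitD l with
  | nil => exact absurd h (pvSplitD_ne_nil l)
  | cons s ss => simp

lemma pvLower_ne_dash (c : Char) (h : PySem.Chars.isalnum c = true) :
    PySem.Chars.lowerChar c ≠ '-' := by
  have hv : ∀ a b : Char, (a ≤ b) ↔ a.toNat ≤ b.toNat := fun a b => by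
    rw [Char.le_def, UInt32.le_iff_toNat_le]; exact Iff.rfl
  simp only [PySem.Chars.isalnum, PySem.Chars.isalpha, PySem.Chars.isdigit,
    PySem.Chars.isupper, PySem.Chars.islower, Bool.or_eq_true, Bool.and_eq_true,
    decide_eq_true_eq, hv] at h
  rw [show ('A' : Char).toNat = 65 from rfl, show ('Z' : Char).toNat = 90 from rfl,
    show ('a' : Char).toNat = 97 from rfl, show ('z' : Char).toNat = 122 from rfl,
    show ('0' : Char).toNat = 48 from rfl, show ('9' : Char).toNat = 57 from rfl] at h
  simp only [PySem.Chars.lowerChar]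
  split_ifs with hu
  · simp only [PySem.Chars.isupper, Bool.and_eq_true, decide_eq_true_eq, hv] at hu
    rw [show ('A' : Char).toNat = 65 from rfl, show ('Z' : Char).toNat = 90 from rfl] at hu
    intro he
    have h45 := congrArg Char.toNat he
    rw [show ('-' : Char).toNat = 45 from rfl, Char.toNat_ofNat,
      if_pos (Or.inl (by omega) : (c.toNat + 32).isValidChar)] at h45
    omega
  · intro he
    have h45 := congrArg Char.toNat he
    rw [show ('-' : Char).toNat = 45 from rfl] at h45
    simp only [PySem.Chars.isupper, Bool.and_eq_true, decide_eq_true_eq, hv, not_and,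
      not_le] at hu
    omega

lemma pvF_of_alnum (c : Char) (h : PySem.Chars.isalnum c = true) :
    pvF c = PySem.Chars.lowerChar c := by simp [pvF, h]

lemma pvF_of_not_alnum (c : Char) (h : ¬ PySem.Chars.isalnum c = true) :
    pvF c = '-' := by simp [pvF, h]

-- prepending a dash-free block to the input extends the first segment
lemma pvSplitD_append (t : List Char) (u : List Char) (ht : ∀ x ∈ t, x ≠ '-') :
    pvSplitD (t ++ u) =
      (match pvSplitD u with
        | s :: ss => (t ++ s) :: ss
        | [] => [t]) := by
  induction t with
  | nil =>
    cases h : pvSplitD u with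
    | nil => exact absurd h (pvSplitD_ne_nil u)
    | cons s ss => simp [h]
  | cons c t' ih =>
    have hc : c ≠ '-' := ht c (List.mem_cons_self ..)
    simp only [List.cons_append, pvSplitD, if_neg hc,
      ih (fun x hx => ht x (List.mem_cons_of_mem _ hx))]
    cases h : pvSplitD u with
    | nil => exact absurd h (pvSplitD_ne_nil u)
    | cons s ss => simp

lemma pvMain (cs : List Char) :
    (pvSplitD (cs.map pvF)).filter (fun segment => segment ≠ []) = pvSegments cs := by
  induction cs using pvSegments.induct with
  | case1 => simp [pvSplitD, pvSegments]
  | case2 c rest halnum ih =>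
    -- alnum head: the first segment is the lowered maximal alnum run
    have hrest : rest = rest.takeWhile PySem.Chars.isalnum ++ rest.dropWhile PySem.Chars.isalnum :=
      (List.takeWhile_append_dropWhile).symm
    have hmap : (c :: rest).map pvF =
        ((c :: rest.takeWhile PySem.Chars.isalnum).map PySem.Chars.lowerChar)
          ++ (rest.dropWhile PySem.Chars.isalnum).map pvF := by
      conv_lhs => rw [show c :: rest = (c :: rest.takeWhile PySem.Chars.isalnum)
        ++ rest.dropWhile PySem.Chars.isalnum by rw [List.cons_append]; rw [← hrest]]
      rw [List.map_append]
      congr 1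
      apply List.map_congr_left
      intro x hx
      rcases List.mem_cons.mp hx with h | h
      · subst h; exact pvF_of_alnum _ halnum
      · exact pvF_of_alnum _ (List.mem_takeWhile_imp h)
    have hdashfree : ∀ x ∈ (c :: rest.takeWhile PySem.Chars.isalnum).map PySem.Chars.lowerChar,
        x ≠ '-' := by
      intro x hx
      rcases List.mem_map.mp hx with ⟨y, hy, rfl⟩
      rcases List.mem_cons.mp hy with h | h
      · subst h; exact pvLower_ne_dash _ halnum
      · exact pvLower_ne_dash _ (List.mem_takeWhile_imp h)
    rw [hmap, pvSplitD_append _ _ hdashfree]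
    have hfirst : pvSplitD ((rest.dropWhile PySem.Chars.isalnum).map pvF) =
        [] :: ((pvSplitD ((rest.dropWhile PySem.Chars.isalnum).map pvF)).tail) ∧
        ((pvSplitD ((rest.dropWhile PySem.Chars.isalnum).map pvF)).tail.filter
          (fun segment => segment ≠ [])) = pvSegments (rest.dropWhile PySem.Chars.isalnum) := by
      cases hd : rest.dropWhile PySem.Chars.isalnum with
      | nil => simp [pvSplitD, pvSegments]
      | cons d ds =>
        have hdna : ¬ PySem.Chars.isalnum d = true := by
          have := List.head?_dropWhile_not PySem.Chars.isalnum rest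
          rw [hd] at this; simpa using this
        have hsp : pvSplitD ((d :: ds).map pvF) = [] :: pvSplitD (ds.map pvF) := by
          simp [pvF_of_not_alnum d hdna, pvSplitD]
        have ih' := ih
        rw [hd, hsp] at ih'
        rw [hsp]
        refine ⟨by simp, ?_⟩
        simp only [List.tail_cons]
        simpa using ih'
    rw [hfirst.1]
    simp only [List.append_nil, List.filter_cons]
    rw [if_pos (by simp :
      (decide (List.map PySem.Chars.lowerChar (c :: rest.takeWhile PySem.Chars.isalnum) ≠ []))
        = true)]
    rw [hfirst.2]
    simp [pvSegments, halnum, PySem.Chars.lower]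
  | case3 c rest halnum ih =>
    simp only [List.map_cons, pvF_of_not_alnum c halnum]
    rw [show pvSplitD ('-' :: List.map pvF rest) = [] :: pvSplitD (List.map pvF rest) by
      simp [pvSplitD]]
    rw [List.filter_cons_of_neg (by simp), ih]
    simp [pvSegments, halnum]

-- ===== VERDICT (by name: the statement is the Claim_ definition above) =====
theorem build_integration_branch_py_spec : Claim_equal_build_integration_branch_py := by
  intro prefix_ run_title _
  unfold Spec_build_integration_branch_py
  simp only [build_integration_branch_py, build_integration_branch_py_alt]
  rw [pvSplitOn_eq,
    show (fun char => if PySem.Chars.isalnum char = true then PySem.Chars.lowerChar char else '-')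
      = pvF from rfl,
    pvMain]
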